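-- pv_equiv track=rewrite | github.com/allenai/allenact | allenact/utils/misc_utils.py | uninterleave
-- ===== SOURCE A (Python) =====
-- from typing import Sequence, List, Optional, Tuple, Hashable
--
-- def uninterleave(seq: Sequence, parts: int) -> List:
--     assert 0 < parts <= len(seq)
--     n = len(seq)
--
--     quotient = n // parts
--
--     return [
--         [seq[i + j * parts] for j in range(quotient + 1) if i + j * parts < len(seq)]
--         for i in range(parts)
--     ]
-- ===== SOURCE B (Python) =====
-- from typing import Sequence, List
--
-- def uninterleave(seq: Sequence, parts: int) -> List:
--     assert 0 < parts <= len(seq)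
--     result = [[] for _ in range(parts)]
--     for k, x in enumerate(seq):
--         result[k % parts].append(x)
--     return result
-- ===== Notes on version B (the rewrite author's own statement) =====
-- stated objective: simpler
-- what changed: A gathers each bucket by strided indexing with a bounds guard in a nested comprehension; B makes a single scatter pass, appending element k to bucket k % parts, with no bounds conditional and no quotient computation.
import Mathlib
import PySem

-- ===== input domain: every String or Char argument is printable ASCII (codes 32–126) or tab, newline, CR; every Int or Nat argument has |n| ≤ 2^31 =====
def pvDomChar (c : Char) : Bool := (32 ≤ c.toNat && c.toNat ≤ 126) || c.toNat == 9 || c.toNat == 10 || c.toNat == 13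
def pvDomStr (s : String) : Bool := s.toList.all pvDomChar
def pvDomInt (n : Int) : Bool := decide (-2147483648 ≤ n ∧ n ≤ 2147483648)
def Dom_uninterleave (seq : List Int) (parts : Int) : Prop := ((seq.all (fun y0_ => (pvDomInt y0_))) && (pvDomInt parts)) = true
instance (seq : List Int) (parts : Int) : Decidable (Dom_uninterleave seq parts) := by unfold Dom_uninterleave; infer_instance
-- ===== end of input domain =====

-- B replaces A's gather-by-strided-indexing (nested comprehension with a bounds guard) by a
-- single scatter pass appending element k to bucket k % parts; same output, simpler.

-- ===== PORT A =====
-- pyGetD is exact here: the comprehension's guard ensures the index is in [0, len(seq)).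
def uninterleave (seq : List Int) (parts : Int) : List (List Int) :=
  let n : Int := (seq.length : Int)
  let quotient : Int := PySem.Int.floordiv n parts
  (PySem.List.pyRange 0 parts 1).map (fun i =>
    ((PySem.List.pyRange 0 (quotient + 1) 1).filter (fun j => decide (i + j * parts < n))).map
      (fun j => PySem.List.pyGetD seq (i + j * parts) 0))

-- ===== PORT B =====
-- .toNat is exact: under Pre_ the index k % parts is nonnegative and < parts = result length.
def uninterleave_alt (seq : List Int) (parts : Int) : List (List Int) :=
  (PySem.List.enumerate seq 0).foldl
    (fun result kx => result.modify (PySem.Int.mod kx.1 parts).toNat (fun b => b ++ [kx.2]))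
    (List.replicate parts.toNat ([] : List Int))

-- ===== PRECONDITION & SPEC =====
-- Pre_ is exactly A's (and B's) assert: 0 < parts <= len(seq); outside it Python raises AssertionError.
def Pre_uninterleave (seq : List Int) (parts : Int) : Prop :=
  0 < parts ∧ parts ≤ (seq.length : Int)
instance (seq : List Int) (parts : Int) : Decidable (Pre_uninterleave seq parts) := by
  unfold Pre_uninterleave; infer_instance

def pvWitness_uninterleave : List Int × Int := ([1, 2, 3, 4, 5], 2)

def Spec_uninterleave (seq : List Int) (parts : Int) (out : List (List Int)) : Prop := out = uninterleave_alt seq parts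
instance (seq : List Int) (parts : Int) (out : List (List Int)) : Decidable (Spec_uninterleave seq parts out) := by unfold Spec_uninterleave; infer_instance

-- ===== CLAIM (what is proved, stated in full; the proofs are below) =====
def Claim_equal_uninterleave : Prop := ∀ (seq : List Int) (parts : Int), Dom_uninterleave seq parts → Pre_uninterleave seq parts → Spec_uninterleave seq parts (uninterleave seq parts)

-- ===== LEMMAS AND PROOFS =====

-- the sublist of elements of l whose global index (counted from s) is ≡ i (mod p)
def gather (p : Nat) (l : List Int) (s : Nat) (i : Nat) : List Int :=
  match l with
  | [] => []
  | x :: xs => (if s % p = i then [x] else []) ++ gather p xs (s + 1) i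

lemma foldB_len (p : Nat) (l : List Int) :
    ∀ (s : Nat) (bs : List (List Int)), bs.length = p →
    ((PySem.List.enumerate l (s : Int)).foldl
      (fun result kx => result.modify (PySem.Int.mod kx.1 (p : Int)).toNat (fun b => b ++ [kx.2]))
      bs).length = p := by
  induction l with
  | nil => intro s bs h; simpa [PySem.List.enumerate_nil] using h
  | cons x xs ih =>
    intro s bs h
    rw [PySem.List.enumerate_cons]
    have hc : ((s : Int) + 1) = ((s + 1 : Nat) : Int) := by push_cast; ring
    rw [List.foldl_cons, hc]
    exact ih (s + 1) _ (by simpa [List.length_modify] using h)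

lemma foldB_getD (p : Nat) (l : List Int) :
    ∀ (s : Nat) (bs : List (List Int)), bs.length = p → ∀ i : Nat, i < p →
    ((PySem.List.enumerate l (s : Int)).foldl
      (fun result kx => result.modify (PySem.Int.mod kx.1 (p : Int)).toNat (fun b => b ++ [kx.2]))
      bs).getD i [] = bs.getD i [] ++ gather p l s i := by
  induction l with
  | nil => intro s bs h i hi; simp [PySem.List.enumerate_nil, gather]
  | cons x xs ih =>
    intro s bs h i hi
    rw [PySem.List.enumerate_cons]
    have hcast : ((s : Int) + 1) = ((s + 1 : Nat) : Int) := by push_cast; ring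
    rw [List.foldl_cons, hcast]
    have hmod : (PySem.Int.mod (s : Int) (p : Int)).toNat = s % p := by
      simp only [PySem.Int.mod_natCast, Int.toNat_natCast]
    have hlen' : (bs.modify (PySem.Int.mod (s : Int) (p : Int)).toNat (fun b => b ++ [x])).length = p := by
      simpa [List.length_modify] using h
    rw [ih (s + 1) _ hlen' i hi, hmod]
    have hi' : i < bs.length := h ▸ hi
    have hgd : (bs.modify (s % p) (fun b => b ++ [x])).getD i []
        = bs.getD i [] ++ (if s % p = i then [x] else []) := by
      by_cases hc : s % p = i
      · subst hc
        rw [List.getD_eq_getElem _ _ (by simpa [List.length_modify] using hi'),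
            List.getElem_modify_eq, List.getD_eq_getElem _ _ hi']
        simp
      · rw [List.getD_eq_getElem _ _ (by simpa [List.length_modify] using hi'),
            List.getElem_modify_ne _ _ hc (by simpa using hi'), List.getD_eq_getElem _ _ hi']
        simp [hc]
    rw [hgd, gather, List.append_assoc]

lemma gather_eq (p : Nat) (l : List Int) :
    ∀ (s i : Nat), gather p l s i =
      ((List.range l.length).filter (fun t => decide ((s + t) % p = i))).map (fun t => l.getD t 0) := by
  induction l with
  | nil => intro s i; simp [gather]
  | cons x xs ih =>
    intro s i
    rw [gather, ih (s + 1) i]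
    rw [List.length_cons, List.range_succ_eq_map, List.filter_cons]
    have hq : (fun t => decide ((s + (t + 1)) % p = i)) = (fun t => decide (((s + 1) + t) % p = i)) := by
      funext t
      have h2 : s + (t + 1) = (s + 1) + t := by omega
      rw [h2]
    by_cases hc : s % p = i
    · simp only [Nat.add_zero, hc, decide_true, if_true, List.map_cons, List.getD_cons_zero,
        List.filter_map, List.map_map, Function.comp_def, Nat.succ_eq_add_one, List.getD_cons_succ]
      rw [hq]
      rfl
    · simp only [Nat.add_zero, hc, decide_false, Bool.false_eq_true, if_false, List.nil_append,
        List.filter_map, List.map_map, Function.comp_def, Nat.succ_eq_add_one, List.getD_cons_succ]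
      rw [hq]

-- the strictly increasing list of indices < n that are ≡ i (mod p), written two ways
lemma strided (p i n : Nat) (hp : 0 < p) (hi : i < p) :
    (List.range n).filter (fun t => decide (t % p = i)) =
    ((List.range (n / p + 1)).filter (fun j => decide (i + j * p < n))).map (fun j => i + j * p) := by
  apply List.Perm.eq_of_pairwise (le := (· < ·)) (fun a b _ _ h1 h2 => absurd h2 (Nat.lt_asymm h1))
  · exact List.Pairwise.filter _ (List.pairwise_lt_range)
  · apply List.pairwise_map.mpr
    apply List.Pairwise.filter
    exact (List.pairwise_lt_range).imp (fun hab => by nlinarith)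
  · -- permutation via nodup + same membership
    have hnd1 : ((List.range n).filter (fun t => decide (t % p = i))).Nodup :=
      (List.nodup_range).filter _
    have hsort2 : (((List.range (n / p + 1)).filter (fun j => decide (i + j * p < n))).map
        (fun j => i + j * p)).Pairwise (· < ·) := by
      apply List.pairwise_map.mpr
      apply List.Pairwise.filter
      exact (List.pairwise_lt_range).imp (fun hab => by nlinarith)
    have hnd2 := hsort2.imp (fun hab => Nat.ne_of_lt hab)
    rw [List.perm_ext_iff_of_nodup hnd1 hnd2]
    intro t
    simp only [List.mem_filter, List.mem_range, List.mem_map, decide_eq_true_eq]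
    constructor
    · rintro ⟨htn, hmod⟩
      refine ⟨t / p, ⟨⟨?_, ?_⟩, ?_⟩⟩
      · have := Nat.div_le_div_right (c := p) (Nat.le_of_lt htn); omega
      · have h1 := Nat.div_add_mod t p
        have h2 : t / p * p = p * (t / p) := Nat.mul_comm _ _
        omega
      · have h1 := Nat.div_add_mod t p
        have h2 : t / p * p = p * (t / p) := Nat.mul_comm _ _
        omega
    · rintro ⟨j, ⟨⟨_, hlt⟩, rfl⟩⟩
      refine ⟨hlt, ?_⟩
      rw [Nat.add_mul_mod_self_right, Nat.mod_eq_of_lt hi]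

lemma bucketA (seq : List Int) (p iN : Nat) (hp0 : 0 < p) (hi : iN < p) :
    ((PySem.List.pyRange 0 (PySem.Int.floordiv (seq.length : Int) (p : Int) + 1) 1).filter
        (fun j => decide ((iN : Int) + j * (p : Int) < (seq.length : Int)))).map
      (fun j => PySem.List.pyGetD seq ((iN : Int) + j * (p : Int)) 0)
    = gather p seq 0 iN := by
  rw [PySem.Int.floordiv_natCast]
  have h1 : ((seq.length / p : Nat) : Int) + 1 = ((seq.length / p + 1 : Nat) : Int) := by
    push_cast; ring
  rw [h1, PySem.List.pyRange_zero_natCast, List.filter_map, List.map_map]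
  rw [gather_eq p seq 0 iN]
  simp only [Nat.zero_add]
  rw [strided p iN seq.length hp0 hi, List.map_map]
  rw [List.filter_congr (q := fun j : Nat => decide (iN + j * p < seq.length))
    (by intro j _; simp only [Function.comp_apply, decide_eq_decide]; omega)]
  apply List.map_congr_left
  intro j _
  simp only [Function.comp_apply]
  have h2 : ((iN : Int) + (j : Int) * (p : Int)) = ((iN + j * p : Nat) : Int) := by
    push_cast; ring
  rw [h2, PySem.List.pyGetD_natCast]

lemma altB (seq : List Int) (p : Nat) :
    uninterleave_alt seq (p : Int) = (List.range p).map (fun i => gather p seq 0 i) := by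
  unfold uninterleave_alt
  have hz : ((0 : Nat) : Int) = (0 : Int) := rfl
  have hlen : (List.replicate ((p : Int)).toNat ([] : List Int)).length = p := by
    simp [Int.toNat_natCast]
  have hL := foldB_len p seq 0 (List.replicate ((p : Int)).toNat []) hlen
  rw [hz] at hL
  apply List.ext_getElem
  · simpa using hL
  · intro i h1 h2
    have hip : i < p := by simpa using h2
    have hgd := foldB_getD p seq 0 (List.replicate ((p : Int)).toNat []) hlen i hip
    rw [hz] at hgd
    rw [← List.getD_eq_getElem _ ([] : List Int) h1, hgd]
    simp [Int.toNat_natCast, hip]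

lemma main_eq (seq : List Int) (p : Nat) (hp0 : 0 < p) :
    uninterleave seq (p : Int) = uninterleave_alt seq (p : Int) := by
  rw [altB seq p]
  unfold uninterleave
  simp only []
  rw [PySem.List.pyRange_zero_natCast, List.map_map]
  apply List.map_congr_left
  intro iN hiN
  simp only [Function.comp_apply]
  exact bucketA seq p iN hp0 (List.mem_range.mp hiN)

-- ===== VERDICT (by name: the statement is the Claim_ definition above) =====
theorem uninterleave_spec : Claim_equal_uninterleave := by
  unfold Claim_equal_uninterleave
  intro seq parts _ hpre
  unfold Spec_uninterleave
  obtain ⟨hpos, _⟩ := hpre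
  have hparts : parts = ((parts.toNat : Nat) : Int) := by omega
  rw [hparts]
  exact main_eq seq parts.toNat (by omega)
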